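-- pv_equiv track=rewrite | github.com/vkir26/web_server | handler.py | response_type
-- ===== SOURCE A (Python) =====
-- from enum import StrEnum
--
-- class ContentType(StrEnum):
--     HTML = "text/html"
--     PLAIN = "text/plain"
--     JSON = "application/json"
--     XML = "application/xml"
--
-- def response_type(data: list[str]) -> ContentType:
--     headers = {}
--     for i in data:
--         header_split = i.split(": ", 1)
--         if len(header_split) >= 2:
--             key, value = header_split
--             headers[key] = value
--
--     for content in ContentType:
--         accept = headers.get("Accept")
--         if accept and content in accept:
--             return ContentType(content)
--     return ContentType.HTML
-- ===== SOURCE B (Python) =====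
-- def response_type(data):
--     accept = None
--     for line in reversed(data):
--         parts = line.split(": ", 1)
--         if len(parts) == 2 and parts[0] == "Accept":
--             accept = parts[1]
--             break
--     if accept:
--         for ct in ("text/html", "text/plain", "application/json", "application/xml"):
--             if ct in accept:
--                 return ct
--     return "text/html"
-- ===== Notes on version B (the rewrite author's own statement) =====
-- stated objective: simpler
-- what changed: B drops the headers dict entirely: it scans the lines in reverse and stops at the first (i.e. last-written) Accept header, then checks the content types in order against that single string.
import Mathlib
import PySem

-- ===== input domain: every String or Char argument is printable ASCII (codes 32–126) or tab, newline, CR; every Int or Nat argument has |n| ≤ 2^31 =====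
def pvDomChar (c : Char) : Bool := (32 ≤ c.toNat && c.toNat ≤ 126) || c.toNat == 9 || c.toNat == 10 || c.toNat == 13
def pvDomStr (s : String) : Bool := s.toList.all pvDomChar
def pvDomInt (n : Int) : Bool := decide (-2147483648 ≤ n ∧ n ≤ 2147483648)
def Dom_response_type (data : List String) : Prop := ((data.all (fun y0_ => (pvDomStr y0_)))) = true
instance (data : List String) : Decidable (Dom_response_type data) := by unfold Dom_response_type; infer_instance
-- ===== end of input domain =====

-- B replaces A's headers dict by a single reverse scan for the last Accept header (objective: simpler).

-- ===== PORT A =====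
-- the ContentType StrEnum, in declaration order
def pvContentTypes : List String := ["text/html", "text/plain", "application/json", "application/xml"]

-- one step of A's header-collecting loop: split on ": " (maxsplit 1), insert when it split
def pvAStep (d : PySem.Dict String String) (i : String) : PySem.Dict String String :=
  match PySem.Str.splitMax? i ": " 1 with
  | some [k, v] => d.insert k v
  | _ => d

-- A's second loop: first content type contained in the (truthy) Accept value, else HTML
def pvALoop (headers : PySem.Dict String String) : List String → String
  | [] => "text/html"
  | c :: rest =>
    match headers.get? "Accept" with
    | some a => if a ≠ "" ∧ PySem.Str.isIn c a then c else pvALoop headers rest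
    | none => pvALoop headers rest

def response_type (data : List String) : String :=
  pvALoop (data.foldl pvAStep PySem.Dict.empty) pvContentTypes

-- ===== PORT B =====
-- B's reverse scan with break: first line (of the reversed list) splitting into key "Accept"
def pvFindAccept : List String → Option String
  | [] => none
  | line :: rest =>
    match PySem.Str.splitMax? line ": " 1 with
    | some [k, v] => if k = "Accept" then some v else pvFindAccept rest
    | _ => pvFindAccept rest

-- B's content-type loop once a truthy accept value is in hand
def pvBLoop (a : String) : List String → String
  | [] => "text/html"
  | c :: rest => if PySem.Str.isIn c a then c else pvBLoop a rest

def response_type_alt (data : List String) : String :=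
  match pvFindAccept data.reverse with
  | some a =>
    if a ≠ "" then pvBLoop a ["text/html", "text/plain", "application/json", "application/xml"]
    else "text/html"
  | none => "text/html"

-- ===== PRECONDITION & SPEC =====
def Spec_response_type (data : List String) (out : String) : Prop := out = response_type_alt data
instance (data : List String) (out : String) : Decidable (Spec_response_type data out) := by unfold Spec_response_type; infer_instance

-- ===== CLAIM (what is proved, stated in full; the proofs are below) =====
def Claim_equal_response_type : Prop := ∀ (data : List String), Dom_response_type data → Spec_response_type data (response_type data)

-- ===== LEMMAS AND PROOFS =====

lemma pvFindAccept_append (l1 l2 : List String) :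
    pvFindAccept (l1 ++ l2) = (pvFindAccept l1).or (pvFindAccept l2) := by
  induction l1 with
  | nil => simp [pvFindAccept]
  | cons x xs ih =>
    simp only [List.cons_append, pvFindAccept]
    cases h : PySem.Str.splitMax? x ": " 1 with
    | none => simpa using ih
    | some l =>
      match l with
      | [] => simpa using ih
      | [k] => simpa using ih
      | [k, v] =>
        by_cases hk : k = "Accept" <;> simp [hk, ih]
      | k :: v :: w :: rest => simpa using ih

-- one step of A's fold seen through the "Accept" key
lemma pvStep_accept (d : PySem.Dict String String) (x : String) :
    (pvAStep d x).get? "Accept" = (pvFindAccept [x]).or (d.get? "Accept") := by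
  simp only [pvAStep, pvFindAccept]
  cases hsp : PySem.Str.splitMax? x ": " 1 with
  | none => simp
  | some l =>
    match l with
    | [] => simp
    | [k] => simp
    | [k, v] =>
      by_cases hk : k = "Accept"
      · subst hk; simp [PySem.Dict.get?_insert_self]
      · simp only [hk, if_false, Option.none_or]
        exact PySem.Dict.get?_insert_of_ne _ _ (Ne.symm hk)
    | k :: v :: w :: rest => simp

-- the Accept entry of A's dict is B's reverse-scan result (last wins), over any start dict
lemma pvFold_get_accept (data : List String) (d : PySem.Dict String String) :
    (data.foldl pvAStep d).get? "Accept"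
      = (pvFindAccept data.reverse).or (d.get? "Accept") := by
  induction data generalizing d with
  | nil => simp [pvFindAccept]
  | cons x xs ih =>
    rw [List.foldl_cons, ih, List.reverse_cons, pvFindAccept_append, pvStep_accept,
      Option.or_assoc]

lemma pvALoop_some (a : String) (ha : a ≠ "") (headers : PySem.Dict String String)
    (h : headers.get? "Accept" = some a) (cs : List String) :
    pvALoop headers cs = pvBLoop a cs := by
  induction cs with
  | nil => rfl
  | cons c rest ih => simp [pvALoop, pvBLoop, h, ha, ih]

lemma pvALoop_falsy (headers : PySem.Dict String String)
    (h : headers.get? "Accept" = none ∨ headers.get? "Accept" = some "") (cs : List String) :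
    pvALoop headers cs = "text/html" := by
  induction cs with
  | nil => rfl
  | cons c rest ih => rcases h with h | h <;> simp [pvALoop, h, ih]

-- ===== VERDICT (by name: the statement is the Claim_ definition above) =====
theorem response_type_spec : Claim_equal_response_type := by
  intro data _
  show response_type data = response_type_alt data
  unfold response_type response_type_alt
  have h := pvFold_get_accept data PySem.Dict.empty
  cases hfa : pvFindAccept data.reverse with
  | none =>
    rw [hfa] at h
    simp [PySem.Dict.get?_empty] at h
    exact pvALoop_falsy _ (Or.inl h) _
  | some a =>
    rw [hfa] at h
    simp at h
    by_cases ha : a = ""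
    · subst ha
      simp [pvALoop_falsy _ (Or.inr h)]
    · simp [ha, pvALoop_some a ha _ h, pvContentTypes]
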